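-- pv_equiv track=rewrite | github.com/sunxibing114514/nscripter-translate-tools | nscript_tool.py | extract_quoted_string
-- ===== SOURCE A (Python) =====
-- def extract_quoted_string(s: str) -> str:
--     """从双引号开头的字符串中提取内容，支持简单的转义"""
--     if not s or s[0] != '"':
--         return ""
--     result = []
--     i = 1
--     while i < len(s):
--         c = s[i]
--         if c == '"':
--             break
--         if c == '\\' and i + 1 < len(s):
--             nxt = s[i + 1]
--             if nxt == '"':
--                 result.append('"')
--             elif nxt == '\\':
--                 result.append('\\')
--             else:
--                 result.append('\\')
--                 result.append(nxt)
--             i += 2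
--         else:
--             result.append(c)
--             i += 1
--     return ''.join(result)
-- ===== SOURCE B (Python) =====
-- import re
--
-- _BODY = re.compile(r'"((?:\\.|[^"])*)', re.DOTALL)
--
-- def extract_quoted_string(s: str) -> str:
--     """从双引号开头的字符串中提取内容，支持简单的转义"""
--     if not s or s[0] != '"':
--         return ""
--     inner = _BODY.match(s).group(1)
--     return re.sub(r'\\(.)', lambda m: m.group(1) if m.group(1) in '"\\' else '\\' + m.group(1), inner, flags=re.DOTALL)
-- ===== Notes on version B (the rewrite author's own statement) =====
-- stated objective: idiomatic
-- what changed: Replaces the explicit indexed while-loop that unescapes char by char with two regex passes: one re.match capturing the body up to the first unescaped quote, then one re.sub that unescapes it.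
import Mathlib
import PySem

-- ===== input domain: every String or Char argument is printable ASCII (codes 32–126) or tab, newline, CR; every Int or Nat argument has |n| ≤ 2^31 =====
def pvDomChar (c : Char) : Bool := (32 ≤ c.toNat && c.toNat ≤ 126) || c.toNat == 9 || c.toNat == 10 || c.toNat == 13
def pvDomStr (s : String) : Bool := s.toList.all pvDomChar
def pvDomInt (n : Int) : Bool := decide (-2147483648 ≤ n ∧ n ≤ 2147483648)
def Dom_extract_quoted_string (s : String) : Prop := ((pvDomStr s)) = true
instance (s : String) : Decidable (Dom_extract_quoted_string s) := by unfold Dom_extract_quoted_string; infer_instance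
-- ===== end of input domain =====

-- B replaces A's indexed char-by-char unescape loop with two regex-style passes
-- (capture the body up to the first unescaped quote, then unescape it); objective: idiomatic.

-- ===== PORT A =====
-- A's while-loop over index i, transcribed as recursion on the suffix s[i:]:
-- the head is s[i], the second element (when present) is s[i+1].
def pvALoop : List Char → List Char
  | [] => []
  | [c] => if c = '"' then [] else [c]          -- i+1 < len fails: else branch appends c
  | c :: nxt :: rest =>
    if c = '"' then []
    else if c = '\\' then
      if nxt = '"' then '"' :: pvALoop rest
      else if nxt = '\\' then '\\' :: pvALoop rest
      else '\\' :: nxt :: pvALoop rest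
    else c :: pvALoop (nxt :: rest)

def extract_quoted_string (s : String) : String :=
  match s.toList with
  | [] => ""                                   -- not s
  | c :: rest => if c ≠ '"' then "" else String.ofList (pvALoop rest)

-- ===== PORT B =====
-- pass 1: re.match(r'"((?:\\.|[^"])*)', s, re.DOTALL) — the captured body:
-- '\\.' consumes two chars when possible, otherwise [^"] consumes one, stop at '"'.
def pvBMatch : List Char → List Char
  | [] => []
  | c :: rest =>
    if c = '"' then []
    else if c = '\\' then
      match rest with
      | nxt :: rest' => '\\' :: nxt :: pvBMatch rest'
      | [] => ['\\']                           -- lone '\' still matches [^"]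
    else c :: pvBMatch rest

-- pass 2: re.sub(r'\\(.)', repl, inner, flags=re.DOTALL)
def pvBSub : List Char → List Char
  | [] => []
  | c :: rest =>
    if c = '\\' then
      match rest with
      | nxt :: rest' =>
        (if nxt = '"' ∨ nxt = '\\' then [nxt] else ['\\', nxt]) ++ pvBSub rest'
      | [] => ['\\']                           -- no following char: '\\(.)' does not match
    else c :: pvBSub rest

def extract_quoted_string_alt (s : String) : String :=
  match s.toList with
  | [] => ""
  | c :: rest => if c ≠ '"' then "" else String.ofList (pvBSub (pvBMatch rest))

-- ===== PRECONDITION & SPEC =====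
def Spec_extract_quoted_string (s : String) (out : String) : Prop := out = extract_quoted_string_alt s
instance (s : String) (out : String) : Decidable (Spec_extract_quoted_string s out) := by unfold Spec_extract_quoted_string; infer_instance

-- ===== CLAIM (what is proved, stated in full; the proofs are below) =====
def Claim_equal_extract_quoted_string : Prop := ∀ (s : String), Dom_extract_quoted_string s → Spec_extract_quoted_string s (extract_quoted_string s)

-- ===== LEMMAS AND PROOFS =====
theorem pvBSub_cons_ne (c : Char) (l : List Char) (h : ¬ c = '\\') :
    pvBSub (c :: l) = c :: pvBSub l := by
  cases l <;> simp [pvBSub, h]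

theorem pvB_eq_pvA : ∀ l : List Char, pvBSub (pvBMatch l) = pvALoop l := by
  intro l
  induction l using pvALoop.induct <;>
    simp_all [pvALoop, pvBMatch, pvBSub, pvBSub_cons_ne] <;>
    (split <;> simp_all [pvBSub])

-- ===== VERDICT (by name: the statement is the Claim_ definition above) =====
theorem extract_quoted_string_spec : Claim_equal_extract_quoted_string := by
  intro s _
  unfold Spec_extract_quoted_string extract_quoted_string extract_quoted_string_alt
  cases s.toList with
  | nil => rfl
  | cons c rest => by_cases h : c = '"' <;> simp [h, pvB_eq_pvA]
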